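-- pv_equiv track=rewrite | github.com/Gvgeorge/Algorithms | methods/greedy/greed3.py | list_of_numbers
-- ===== SOURCE A (Python) =====
-- def list_of_numbers(number: int) -> list[int]:
--     '''
--     Greedy alg that for the given input number
--     returns the maximum possible list of unique natural
--     numbers sum of which equals to the input number
--
--     >>>list_of_numbers(12)
--     >>>[1, 2, 3, 6]
--     '''
--     if number <= 1:
--         return [number]
--
--     result = []
--     summ = 0
--     for n in range(1, number):
--         if summ + 2 * n + 1 > number:
--             result.append(number - summ)
--             break
--         result.append(n)
--         summ += n
--     return result
-- ===== SOURCE B (Python) =====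
-- import math
--
--
-- def list_of_numbers(number: int) -> list[int]:
--     if number <= 1:
--         return [number]
--     # t = largest t with t*(t+1)//2 <= number, via exact integer sqrt
--     t = (math.isqrt(8 * number + 1) - 1) // 2
--     k = t - 1
--     return list(range(1, k + 1)) + [number - k * (k + 1) // 2]
-- ===== Notes on version B (the rewrite author's own statement) =====
-- stated objective: alternative
-- what changed: B eliminates A's accumulating loop entirely: it computes the breakpoint in closed form via math.isqrt (exact for big ints) and builds the prefix range plus the absorbed remainder flat, with no running sum and no break.
import Mathlib
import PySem

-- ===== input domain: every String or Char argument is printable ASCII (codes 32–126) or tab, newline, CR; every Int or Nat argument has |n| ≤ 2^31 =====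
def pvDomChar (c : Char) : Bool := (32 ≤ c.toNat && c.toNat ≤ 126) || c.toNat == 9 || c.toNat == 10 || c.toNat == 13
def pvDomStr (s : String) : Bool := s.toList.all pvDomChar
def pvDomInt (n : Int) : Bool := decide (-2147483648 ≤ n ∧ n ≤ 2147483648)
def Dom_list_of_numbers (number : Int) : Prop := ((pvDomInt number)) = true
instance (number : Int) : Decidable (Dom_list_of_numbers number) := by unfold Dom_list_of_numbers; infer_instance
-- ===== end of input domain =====

-- B replaces A's accumulate-and-break loop by a loop-free closed form: the
-- breakpoint is computed with integer sqrt and the list is built flat (objective: alternative).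

-- ===== PORT A =====
-- the `for n in range(1, number)` loop of A, with `break` modelled by returning
def loopA_list_of_numbers (number n summ : Int) (result : List Int) : List Int :=
  if _h : n < number then
    if number < summ + 2 * n + 1 then result ++ [number - summ]
    else loopA_list_of_numbers number (n + 1) (summ + n) (result ++ [n])
  else result
termination_by (number - n).toNat
decreasing_by omega

def list_of_numbers (number : Int) : List Int :=
  if number ≤ 1 then [number]
  else loopA_list_of_numbers number 1 0 []

-- ===== PORT B =====
-- math.isqrt of the (positive) argument 8*number+1 is Nat.sqrt of its Nat value;
-- `//` with the positive divisor 2 is PySem.Int.floordiv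
def list_of_numbers_alt (number : Int) : List Int :=
  if number ≤ 1 then [number]
  else
    let t : Int := PySem.Int.floordiv ((Nat.sqrt (8 * number + 1).toNat : Int) - 1) 2
    let k : Int := t - 1
    PySem.List.pyRange 1 (k + 1) 1 ++ [number - PySem.Int.floordiv (k * (k + 1)) 2]

-- ===== PRECONDITION & SPEC =====
def Spec_list_of_numbers (number : Int) (out : List Int) : Prop := out = list_of_numbers_alt number
instance (number : Int) (out : List Int) : Decidable (Spec_list_of_numbers number out) := by unfold Spec_list_of_numbers; infer_instance

-- ===== CLAIM (what is proved, stated in full; the proofs are below) =====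
def Claim_equal_list_of_numbers : Prop := ∀ (number : Int), Dom_list_of_numbers number → Spec_list_of_numbers number (list_of_numbers number)

-- ===== LEMMAS AND PROOFS =====

-- A's break test at step n, with summ = tri(n-1), is the triangular test tri(n+1) > number
theorem break_test (n number : Int) :
    (number < (n - 1) * n / 2 + 2 * n + 1) ↔ (number < (n + 1) * (n + 2) / 2) := by
  obtain ⟨a, ha⟩ := Int.even_mul_pred_self n
  obtain ⟨b, hb⟩ := Int.even_mul_succ_self (n + 1)
  have e1 : (n - 1) * n = n * (n - 1) := by ring
  have e2 : (n + 1) * (n + 2) = n * (n - 1) + 4 * n + 2 := by ring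
  have e3 : (n + 1) * (n + 1 + 1) = (n + 1) * (n + 2) := by ring
  omega

-- B's closed-form t from the integer sqrt is the largest t with tri(t) ≤ number (and 1 ≤ t when 2 ≤ number)
theorem tB_bounds (number : Int) (h2 : 2 ≤ number) :
    1 ≤ PySem.Int.floordiv ((Nat.sqrt (8 * number + 1).toNat : Int) - 1) 2 ∧
    (PySem.Int.floordiv ((Nat.sqrt (8 * number + 1).toNat : Int) - 1) 2) *
      (PySem.Int.floordiv ((Nat.sqrt (8 * number + 1).toNat : Int) - 1) 2 + 1) / 2 ≤ number ∧
    number < (PySem.Int.floordiv ((Nat.sqrt (8 * number + 1).toNat : Int) - 1) 2 + 1) *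
      (PySem.Int.floordiv ((Nat.sqrt (8 * number + 1).toNat : Int) - 1) 2 + 2) / 2 := by
  set m : Nat := (8 * number + 1).toNat with hm
  have hmv : (m : Int) = 8 * number + 1 := by omega
  have hloN := Nat.sqrt_le' m
  rw [Nat.pow_two] at hloN
  have hloZ : (Nat.sqrt m : Int) * (Nat.sqrt m : Int) ≤ 8 * number + 1 := by
    have : ((Nat.sqrt m * Nat.sqrt m : Nat) : Int) ≤ (m : Int) := by exact_mod_cast hloN
    push_cast at this; omega
  have hhiN := Nat.lt_succ_sqrt' m
  rw [Nat.succ_eq_add_one, Nat.pow_two] at hhiN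
  have hhiZ : 8 * number + 1 < ((Nat.sqrt m : Int) + 1) * ((Nat.sqrt m : Int) + 1) := by
    have : ((m : Nat) : Int) < (((Nat.sqrt m + 1) * (Nat.sqrt m + 1) : Nat) : Int) := by exact_mod_cast hhiN
    push_cast at this; omega
  set s : Int := (Nat.sqrt m : Int) with hs
  have hs4 : 4 ≤ s := by
    by_contra hc
    push_cast at hc
    have hsn : Nat.sqrt m < 4 := by omega
    have : m < 4 * 4 := Nat.sqrt_lt'.mp hsn
    omega
  rw [PySem.Int.floordiv_eq_ediv_of_pos (by omega : (0:Int) < 2)]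
  set t : Int := (s - 1) / 2 with ht
  have hd := Int.emod_add_mul_ediv (s - 1) 2
  have hm0 : 0 ≤ (s - 1) % 2 := Int.emod_nonneg _ (by omega)
  have hm2 : (s - 1) % 2 < 2 := Int.emod_lt_of_pos _ (by omega)
  -- 2t ≤ s-1 ≤ 2t+1
  have htr1 : 2 * t ≤ s - 1 := by omega
  have htr2 : s - 1 ≤ 2 * t + 1 := by omega
  have ht1 : 1 ≤ t := by omega
  refine ⟨ht1, ?_, ?_⟩
  · -- t(t+1)/2 ≤ number  from  (2t+1)² ≤ s² ≤ 8n+1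
    have h1 : (2 * t + 1) * (2 * t + 1) ≤ s * s :=
      mul_le_mul (by omega) (by omega) (by omega) (by omega)
    have h2' : (2 * t + 1) * (2 * t + 1) = 4 * (t * (t + 1)) + 1 := by ring
    obtain ⟨a, ha⟩ := Int.even_mul_succ_self t
    omega
  · -- number < (t+1)(t+2)/2  from  8n+1 < (s+1)² ≤ (2t+3)²
    have h1 : (s + 1) * (s + 1) ≤ (2 * t + 3) * (2 * t + 3) :=
      mul_le_mul (by omega) (by omega) (by omega) (by omega)
    have h2' : (2 * t + 3) * (2 * t + 3) = 4 * ((t + 1) * (t + 2)) + 1 := by ring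
    obtain ⟨b, hb⟩ := Int.even_mul_succ_self (t + 1)
    have e3 : (t + 1) * (t + 1 + 1) = (t + 1) * (t + 2) := by ring
    omega

-- triangular numbers are monotone, stated on the halved products
theorem tri_mono (n t : Int) (h1 : 1 ≤ n) (h : n + 1 ≤ t) :
    (n + 1) * (n + 2) / 2 ≤ t * (t + 1) / 2 := by
  have h1' : (n + 1) * (n + 2) ≤ t * (t + 1) :=
    mul_le_mul (by omega) (by omega) (by omega) (by omega)
  obtain ⟨a, ha⟩ := Int.even_mul_succ_self (n + 1)
  obtain ⟨b, hb⟩ := Int.even_mul_succ_self t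
  have e1 : (n + 1) * (n + 1 + 1) = (n + 1) * (n + 2) := by ring
  omega

-- Main bridge: from step n with A's invariant state, A's loop appends exactly
-- the block n, …, t-1 followed by the remainder, where t is the largest t with tri(t) ≤ number.
theorem bridgeA (number t : Int) (h2 : 2 ≤ number) (ht1 : 1 ≤ t)
    (hlo : t * (t + 1) / 2 ≤ number) (hhi : number < (t + 1) * (t + 2) / 2) :
    ∀ (m : Nat) (n : Int) (res : List Int),
    m = (t - n).toNat → 1 ≤ n → n ≤ t →
    loopA_list_of_numbers number n ((n - 1) * n / 2) res =
      res ++ PySem.List.pyRange n t 1 ++ [number - (t - 1) * t / 2] := by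
  intro m
  induction m using Nat.strong_induction_on with
  | _ m ih =>
    intro n res hm hn1 hnt
    obtain ⟨b, hb⟩ := Int.even_mul_succ_self t
    have htlt : t < number := by
      rcases eq_or_lt_of_le ht1 with h1 | h1
      · omega
      · have key : 2 * t + 2 ≤ t * (t + 1) := by nlinarith
        omega
    rw [loopA_list_of_numbers, dif_pos (by omega : n < number)]
    by_cases heq : n = t
    · -- break step
      have hbr : number < (n - 1) * n / 2 + 2 * n + 1 := by
        rw [break_test]; subst heq; exact hhi
      rw [if_pos hbr, heq, PySem.List.pyRange_one_eq_nil (le_refl t)]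
      simp
    · -- continue step: n < t, so tri(n+1) ≤ tri(t) ≤ number and the break test fails
      have hlt : n + 1 ≤ t := by omega
      have hnobr : ¬ number < (n - 1) * n / 2 + 2 * n + 1 := by
        rw [break_test]
        have := tri_mono n t hn1 hlt
        omega
      rw [if_neg hnobr]
      have hsum : (n - 1) * n / 2 + n = (n + 1 - 1) * (n + 1) / 2 := by
        obtain ⟨a, ha⟩ := Int.even_mul_pred_self n
        obtain ⟨c, hc⟩ := Int.even_mul_succ_self n
        have e1 : (n - 1) * n = n * (n - 1) := by ring
        have e2 : (n + 1 - 1) * (n + 1) = n * (n - 1) + 2 * n := by ring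
        omega
      rw [hsum, ih (t - (n + 1)).toNat (by omega) (n + 1) (res ++ [n]) rfl (by omega) hlt,
          PySem.List.pyRange_one_cons (by omega : n < t)]
      simp

-- ===== VERDICT (by name: the statement is the Claim_ definition above) =====
theorem list_of_numbers_spec : Claim_equal_list_of_numbers := by
  intro number _
  unfold Spec_list_of_numbers list_of_numbers list_of_numbers_alt
  by_cases h1 : number ≤ 1
  · rw [if_pos h1, if_pos h1]
  · rw [if_neg h1, if_neg h1]
    obtain ⟨ht1, hlo, hhi⟩ := tB_bounds number (by omega)
    set t : Int := PySem.Int.floordiv ((Nat.sqrt (8 * number + 1).toNat : Int) - 1) 2 with ht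
    have hz : (0 : Int) = (1 - 1) * 1 / 2 := by decide
    rw [hz, bridgeA number t (by omega) ht1 hlo hhi (t - 1).toNat 1 [] (by omega) (le_refl 1) ht1]
    have e1 : t - 1 + 1 = t := by ring
    have e2 : (t - 1) * (t - 1 + 1) = (t - 1) * t := by ring
    simp only [PySem.Int.floordiv_eq_ediv_of_pos (by omega : (0:Int) < 2), e1]
    simp
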